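-- pv_equiv track=rewrite | github.com/AhaanV05/Market-Regime-Classifier | backend/main.py | _pick_feature_subset
-- ===== SOURCE A (Python) =====
-- from typing import Any, Dict, List, Optional, Tuple
--
-- def _pick_feature_subset(feature_names: List[str], priority: List[str], max_items: int = 8):
--     chosen = []
--     for f in priority:
--         if f in feature_names and f not in chosen:
--             chosen.append(f)
--     if len(chosen) < max_items:
--         for f in feature_names:
--             if f not in chosen:
--                 chosen.append(f)
--             if len(chosen) >= max_items:
--                 break
--     return chosen[:max_items]
-- ===== SOURCE B (Python) =====
-- def _pick_feature_subset(feature_names, priority, max_items=8):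
--     def rank(f):
--         if f in priority:
--             return priority.index(f)
--         return len(priority) + feature_names.index(f)
--     return sorted(dict.fromkeys(feature_names), key=rank)[:max_items]
-- ===== Notes on version B (the rewrite author's own statement) =====
-- stated objective: alternative
-- what changed: Replaces A's two guarded accumulation loops with a rank-and-sort: each distinct feature gets a numeric rank (its index in priority if present there, else len(priority) plus its index in feature_names) and the distinct feature names are sorted by that rank and sliced to max_items.
-- outside the precondition, e.g. on _pick_feature_subset(['a', 'b'], ['a'], -1): A returns [], B returns ['a']
import Mathlib
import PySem

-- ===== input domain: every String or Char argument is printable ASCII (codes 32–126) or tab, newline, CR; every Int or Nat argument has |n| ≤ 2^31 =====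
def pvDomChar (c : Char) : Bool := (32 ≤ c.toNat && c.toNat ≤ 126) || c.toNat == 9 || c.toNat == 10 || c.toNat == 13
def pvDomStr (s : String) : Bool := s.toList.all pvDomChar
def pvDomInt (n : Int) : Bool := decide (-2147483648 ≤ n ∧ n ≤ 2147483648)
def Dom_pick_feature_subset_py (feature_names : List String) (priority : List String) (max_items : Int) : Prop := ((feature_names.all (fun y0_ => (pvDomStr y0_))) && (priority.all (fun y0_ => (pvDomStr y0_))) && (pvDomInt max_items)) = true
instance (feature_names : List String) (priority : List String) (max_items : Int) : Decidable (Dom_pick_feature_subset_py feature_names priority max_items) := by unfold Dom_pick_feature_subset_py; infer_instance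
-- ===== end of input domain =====

-- B replaces A's two guarded accumulation loops by a rank-and-sort: each distinct feature gets a
-- numeric rank (index in priority if present there, else len(priority) + index in feature_names)
-- and the distinct features are sorted by that rank and sliced (objective: alternative algorithm).

-- ===== PORT A =====
-- second for-loop of A, with the in-loop break once len(chosen) >= max_items
def pickA_loop2 (max_items : Int) : List String → List String → List String
  | chosen, [] => chosen
  | chosen, f :: rest =>
      let chosen' := if chosen.contains f then chosen else chosen ++ [f]
      if max_items ≤ (chosen'.length : Int) then chosen' else pickA_loop2 max_items chosen' rest

def pick_feature_subset_py (feature_names : List String) (priority : List String) (max_items : Int) : List String :=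
  let chosen := priority.foldl (fun acc f => if feature_names.contains f && !acc.contains f then acc ++ [f] else acc) []
  let chosen := if (chosen.length : Int) < max_items then pickA_loop2 max_items chosen feature_names else chosen
  PySem.List.slice chosen none (some max_items)

-- ===== PORT B =====
-- rank(f) of Source B; the 'feature_names.index(f)' branch is only reached on f drawn from
-- dict.fromkeys(feature_names), where it cannot raise, so '.getD 0' is exact there
def pickB_rank (feature_names : List String) (priority : List String) (f : String) : Int :=
  if priority.contains f then (((PySem.List.index? priority f).getD 0 : Nat) : Int)
  else (priority.length : Int) + (((PySem.List.index? feature_names f).getD 0 : Nat) : Int)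

def pick_feature_subset_py_alt (feature_names : List String) (priority : List String) (max_items : Int) : List String :=
  PySem.List.slice (PySem.List.sorted (PySem.List.dedup feature_names) (pickB_rank feature_names priority)) none (some max_items)

-- ===== PRECONDITION & SPEC =====
-- Pre_ excludes negative max_items whose magnitude is below the number of distinct feature names: there A's
-- negative slice is applied to only the priority-filtered prefix (the len-guard never fires), an artefact of
-- A's implementation that B (slicing the full ranked list) does not reproduce; for all other max_items —
-- including max_items ≤ -(distinct count), where both slices are empty — equality is claimed.
def Pre_pick_feature_subset_py (feature_names : List String) (priority : List String) (max_items : Int) : Prop := 0 ≤ max_items ∨ max_items + ((PySem.List.dedup feature_names).length : Int) ≤ 0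
instance (feature_names : List String) (priority : List String) (max_items : Int) : Decidable (Pre_pick_feature_subset_py feature_names priority max_items) := by unfold Pre_pick_feature_subset_py; infer_instance
def pvWitness_pick_feature_subset_py : List String × List String × Int := (["a", "b"], ["b", "c"], 2)
def Spec_pick_feature_subset_py (feature_names : List String) (priority : List String) (max_items : Int) (out : List String) : Prop := out = pick_feature_subset_py_alt feature_names priority max_items
instance (feature_names : List String) (priority : List String) (max_items : Int) (out : List String) : Decidable (Spec_pick_feature_subset_py feature_names priority max_items out) := by unfold Spec_pick_feature_subset_py; infer_instance

-- ===== CLAIM (what is proved, stated in full; the proofs are below) =====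
def Claim_equal_pick_feature_subset_py : Prop := ∀ (feature_names : List String) (priority : List String) (max_items : Int), Dom_pick_feature_subset_py feature_names priority max_items → Pre_pick_feature_subset_py feature_names priority max_items → Spec_pick_feature_subset_py feature_names priority max_items (pick_feature_subset_py feature_names priority max_items)

-- ===== LEMMAS AND PROOFS =====

-- folding Set.add only appends: the accumulator is a prefix of the result
theorem foldl_add_prefix (xs : List String) : ∀ (acc : List String), ∃ t, xs.foldl PySem.Set.add acc = acc ++ t := by
  induction xs with
  | nil => intro acc; exact ⟨[], by simp⟩
  | cons f rest ih =>
      intro acc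
      obtain ⟨t, ht⟩ := ih (PySem.Set.add acc f)
      rw [List.foldl_cons, ht]
      by_cases h : f ∈ acc
      · exact ⟨t, by simp [PySem.Set.add, PySem.Set.contains_eq_listContains, h] at ht ⊢⟩
      · exact ⟨f :: t, by simp [PySem.Set.add, PySem.Set.contains_eq_listContains, h] at ht ⊢⟩

-- A's break-loop agrees with the plain dedup fold up to take
theorem loop2_take (m : Int) (xs : List String) :
    ∀ acc : List String, (acc.length : Int) < m →
      (pickA_loop2 m acc xs).take m.toNat = (xs.foldl PySem.Set.add acc).take m.toNat := by
  induction xs with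
  | nil => intro acc _; rfl
  | cons f rest ih =>
      intro acc hlt
      simp only [pickA_loop2, List.foldl_cons]
      have hadd : (if acc.contains f then acc else acc ++ [f]) = PySem.Set.add acc f := by
        simp [PySem.Set.add]
      rw [hadd]
      split
      · next hge =>
          obtain ⟨t, ht⟩ := foldl_add_prefix rest (PySem.Set.add acc f)
          rw [ht, List.take_append_of_le_length (by omega)]
      · next hlt' => exact ih _ (by omega)

-- A's first loop is the dedup fold over the priority list filtered to the feature names
theorem first_loops_eq (feature_names priority : List String) :
    priority.foldl (fun acc f => if feature_names.contains f && !acc.contains f then acc ++ [f] else acc) [] =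
      (priority.filter (fun f => feature_names.contains f)).foldl PySem.Set.add [] := by
  rw [List.foldl_filter]
  apply PySem.List.foldl_congr_mem
  intro acc f _
  by_cases h1 : f ∈ feature_names <;> by_cases h2 : f ∈ acc <;>
    simp [PySem.Set.add, PySem.Set.contains_eq_listContains, h1, h2]

-- dedup fold on an arbitrary accumulator = accumulator ++ (new distinct elements in order)
theorem foldl_add_filter (ys : List String) : ∀ acc : List String,
    ys.foldl PySem.Set.add acc = acc ++ (PySem.Set.ofList ys).filter (fun x => !acc.contains x) := by
  induction ys with
  | nil => intro acc; simp [PySem.Set.ofList]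
  | cons x ys ih =>
      intro acc
      have hx : PySem.Set.ofList (x :: ys) = [x] ++ (PySem.Set.ofList ys).filter (fun z => !([x].contains z)) := by
        rw [PySem.Set.ofList_eq_foldl, List.foldl_cons]
        have h0 : PySem.Set.add [] x = [x] := by simp [PySem.Set.add]
        rw [h0, ih [x]]
      rw [List.foldl_cons, ih (PySem.Set.add acc x), hx]
      by_cases h : x ∈ acc
      · have ha : PySem.Set.add acc x = acc := by
          simp [PySem.Set.add, PySem.Set.contains_eq_listContains, h]
        rw [ha]
        simp only [List.filter_append, List.filter_filter]
        have h1 : List.filter (fun z => !acc.contains z) [x] = [] := by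
          simp [h]
        have h2 : ∀ l : List String, List.filter (fun z => !acc.contains z && !([x].contains z)) l
            = List.filter (fun z => !acc.contains z) l := by
          intro l
          apply List.filter_congr
          intro z _
          by_cases hz : z = x
          · subst hz; simp [h]
          · simp [hz]
        rw [h1, h2]
        simp
      · have ha : PySem.Set.add acc x = acc ++ [x] := by
          simp [PySem.Set.add, PySem.Set.contains_eq_listContains, h]
        rw [ha]
        simp only [List.filter_append, List.filter_filter]
        have h1 : List.filter (fun z => !acc.contains z) [x] = [x] := by
          simp [h]
        have h2 : ∀ l : List String, List.filter (fun z => !(acc ++ [x]).contains z) l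
            = List.filter (fun z => !acc.contains z && !([x].contains z)) l := by
          intro l
          apply List.filter_congr
          intro z _
          by_cases hz : z = x <;> simp [hz, h, Bool.and_comm]
        rw [h2, h1]
        simp

theorem ofList_cons_char (y : String) (ys : List String) :
    PySem.Set.ofList (y :: ys) = y :: (PySem.Set.ofList ys).filter (fun x => !(x == y)) := by
  rw [PySem.Set.ofList_eq_foldl, List.foldl_cons]
  have : PySem.Set.add [] y = [y] := by simp [PySem.Set.add]
  rw [this, foldl_add_filter]
  simp only [List.singleton_append, List.cons.injEq, true_and]
  apply List.filter_congr
  intro z _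
  by_cases h : z = y <;> simp [h]

-- dedup keeps first occurrences: along ofList ys, first-occurrence indices strictly increase
theorem ofList_pairwise_idxOf (ys : List String) :
    (PySem.Set.ofList ys).Pairwise (fun a b => List.idxOf a ys < List.idxOf b ys) := by
  induction ys with
  | nil => simp [PySem.Set.ofList]
  | cons y ys ih =>
      rw [ofList_cons_char]
      constructor
      · intro b hb
        have hbne : b ≠ y := by
          have := List.of_mem_filter hb
          simpa using this
        simp [Ne.symm hbne]
      · have hf := ih.filter (fun x => !(x == y))
        refine hf.imp_of_mem ?_
        intro a b ha hb hlt
        have hane : a ≠ y := by have := List.of_mem_filter ha; simpa using this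
        have hbne : b ≠ y := by have := List.of_mem_filter hb; simpa using this
        simp [Ne.symm hane, Ne.symm hbne]
        omega

-- first-occurrence order is preserved by filtering
theorem idxOf_filter_mono (p : String → Bool) (l : List String) : ∀ a b : String,
    a ∈ l.filter p → b ∈ l.filter p →
    List.idxOf a (l.filter p) < List.idxOf b (l.filter p) → List.idxOf a l < List.idxOf b l := by
  induction l with
  | nil => simp
  | cons x l ih =>
      intro a b ha hb hlt
      by_cases hp : p x
      · rw [List.filter_cons_of_pos hp] at ha hb hlt
        by_cases hbx : b = x
        · subst hbx; simp [List.idxOf_cons] at hlt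
        · by_cases hax : a = x
          · subst hax
            have hbl : b ∈ l.filter p := by
              rcases List.mem_cons.mp hb with h | h
              · exact absurd h hbx
              · exact h
            have hbmem : b ∈ l := List.mem_of_mem_filter hbl
            simp [Ne.symm hbx]
          · have hal : a ∈ l.filter p := by
              rcases List.mem_cons.mp ha with h | h
              · exact absurd h hax
              · exact h
            have hbl : b ∈ l.filter p := by
              rcases List.mem_cons.mp hb with h | h
              · exact absurd h hbx
              · exact h
            have hlt' : List.idxOf a (l.filter p) < List.idxOf b (l.filter p) := by
              simp [Ne.symm hax, Ne.symm hbx] at hlt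
              omega
            have := ih a b hal hbl hlt'
            simp [Ne.symm hax, Ne.symm hbx]
            omega
      · rw [List.filter_cons_of_neg hp] at ha hb hlt
        have hax : a ≠ x := by
          intro h; subst h; exact hp (List.of_mem_filter ha)
        have hbx : b ≠ x := by
          intro h; subst h; exact hp (List.of_mem_filter hb)
        have := ih a b ha hb hlt
        simp [Ne.symm hax, Ne.symm hbx]
        omega

-- list.index on a member is the first-occurrence index
theorem idxOf?_getD_of_mem (l : List String) (f : String) (h : f ∈ l) :
    (List.idxOf? f l).getD 0 = List.idxOf f l := by
  have hs : (List.idxOf? f l).isSome := by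
    rw [← PySem.List.index?_eq_idxOf?, PySem.List.index?_isSome_iff]; exact h
  obtain ⟨k, hk⟩ := Option.isSome_iff_exists.mp hs
  rw [List.idxOf_eq_getD_idxOf?, hk]; rfl

-- rank is what Source B computes, written with idxOf, on members of feature_names
theorem rank_eq_idxOf (feature_names priority : List String) (x : String) (hx : x ∈ feature_names) :
    pickB_rank feature_names priority x =
      if x ∈ priority then (List.idxOf x priority : Int)
      else (priority.length : Int) + (List.idxOf x feature_names : Int) := by
  by_cases px : x ∈ priority
  · simp [pickB_rank, px, idxOf?_getD_of_mem _ _ px]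
  · simp [pickB_rank, px, idxOf?_getD_of_mem _ _ hx]

-- B's sort reproduces the combined first-occurrence order that A accumulates
theorem sorted_rank_eq (feature_names priority : List String) :
    PySem.List.sorted (PySem.List.dedup feature_names) (pickB_rank feature_names priority) =
      PySem.Set.ofList ((priority.filter (fun f => feature_names.contains f)) ++ feature_names) := by
  rw [PySem.List.dedup_eq_ofList]
  apply PySem.List.sorted_eq_of_perm_of_pairwise_lt
  · rw [List.perm_ext_iff_of_nodup (PySem.Set.nodup_ofList _) (PySem.Set.nodup_ofList _)]
    intro a
    rw [PySem.Set.mem_ofList, PySem.Set.mem_ofList, List.mem_append]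
    constructor
    · rintro (h | h)
      · simpa using (List.mem_filter.mp h).2
      · exact h
    · intro h; exact Or.inr h
  · refine (ofList_pairwise_idxOf _).imp_of_mem ?_
    intro a b ha hb hlt
    have haC := (PySem.Set.mem_ofList _ _).mp ha
    have hbC := (PySem.Set.mem_ofList _ _).mp hb
    have hafn : a ∈ feature_names := by
      rcases List.mem_append.mp haC with h | h
      · simpa using (List.mem_filter.mp h).2
      · exact h
    have hbfn : b ∈ feature_names := by
      rcases List.mem_append.mp hbC with h | h
      · simpa using (List.mem_filter.mp h).2
      · exact h
    have haF : a ∈ priority.filter (fun f => feature_names.contains f) ↔ a ∈ priority := by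
      simp [List.mem_filter, hafn]
    have hbF : b ∈ priority.filter (fun f => feature_names.contains f) ↔ b ∈ priority := by
      simp [List.mem_filter, hbfn]
    rw [List.idxOf_append, List.idxOf_append] at hlt
    rw [rank_eq_idxOf _ _ _ hafn, rank_eq_idxOf _ _ _ hbfn]
    by_cases pa : a ∈ priority <;> by_cases pb : b ∈ priority
    · rw [if_pos (haF.mpr pa), if_pos (hbF.mpr pb)] at hlt
      have h2 := idxOf_filter_mono (fun f => feature_names.contains f) priority a b
        (haF.mpr pa) (hbF.mpr pb) hlt
      simp [pa, pb]
      exact_mod_cast h2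
    · have h2 := List.idxOf_lt_length_of_mem pa
      simp only [if_pos pa, if_neg pb]
      omega
    · rw [if_neg (fun h => pa (haF.mp h)), if_pos (hbF.mpr pb)] at hlt
      have h2 := List.idxOf_lt_length_of_mem (hbF.mpr pb)
      omega
    · rw [if_neg (fun h => pa (haF.mp h)), if_neg (fun h => pb (hbF.mp h))] at hlt
      simp only [if_neg pa, if_neg pb]
      omega

-- ===== VERDICT (by name: the statement is the Claim_ definition above) =====
theorem pick_feature_subset_py_spec : Claim_equal_pick_feature_subset_py := by
  intro feature_names priority max_items _ hpre
  unfold Spec_pick_feature_subset_py pick_feature_subset_py pick_feature_subset_py_alt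
  dsimp only
  by_cases hm : (0 : Int) ≤ max_items
  case neg =>
    -- both slices are empty: max_items ≤ -(number of distinct feature names)
    have hsmall : max_items + ((PySem.List.dedup feature_names).length : Int) ≤ 0 := by
      rcases hpre with h | h
      · exact absurd h hm
      · exact h
    rw [first_loops_eq]
    set c1 := (priority.filter (fun f => feature_names.contains f)).foldl PySem.Set.add ([] : List String) with hc1
    rw [if_neg (by omega)]
    have hc1len : c1.length ≤ (PySem.List.dedup feature_names).length := by
      have hc1of : c1 = PySem.Set.ofList (priority.filter (fun f => feature_names.contains f)) := by
        rw [PySem.Set.ofList_eq_foldl]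
      have hnd : c1.Nodup := by rw [hc1of]; exact PySem.Set.nodup_ofList _
      have hsub : c1 ⊆ PySem.List.dedup feature_names := by
        intro x hx
        rw [hc1of, PySem.Set.mem_ofList] at hx
        rw [PySem.List.dedup_eq_ofList, PySem.Set.mem_ofList]
        simpa using (List.mem_filter.mp hx).2
      calc c1.length = c1.toFinset.card := (List.toFinset_card_of_nodup hnd).symm
        _ ≤ (PySem.List.dedup feature_names).toFinset.card :=
            Finset.card_le_card (fun a ha => List.mem_toFinset.mpr (hsub (List.mem_toFinset.mp ha)))
        _ ≤ (PySem.List.dedup feature_names).length := List.toFinset_card_le _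
    have hk : max_items = -(((-max_items).toNat : Nat) : Int) := by omega
    have hkpos : 0 < (-max_items).toNat := by omega
    rw [hk, PySem.List.slice_to_neg_natCast _ _ hkpos, PySem.List.slice_to_neg_natCast _ _ hkpos,
      PySem.List.length_sorted]
    have h1 : c1.length - (-max_items).toNat = 0 := by omega
    have h2 : (PySem.List.dedup feature_names).length - (-max_items).toNat = 0 := by omega
    rw [h1, h2]
    simp
  rw [sorted_rank_eq, first_loops_eq]
  set c1 := (priority.filter (fun f => feature_names.contains f)).foldl PySem.Set.add ([] : List String) with hc1
  have hC : PySem.Set.ofList ((priority.filter (fun f => feature_names.contains f)) ++ feature_names)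
      = feature_names.foldl PySem.Set.add c1 := by
    rw [PySem.Set.ofList_eq_foldl, List.foldl_append]
  rw [hC, PySem.List.slice_to _ hm, PySem.List.slice_to _ hm]
  by_cases h : (c1.length : Int) < max_items
  · rw [if_pos h]
    exact loop2_take max_items feature_names c1 h
  · rw [if_neg h]
    obtain ⟨t, ht⟩ := foldl_add_prefix feature_names c1
    rw [ht, List.take_append_of_le_length (by omega)]
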